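-- pv_equiv track=rewrite | github.com/mobeen777/FYP | djangoProject/Flow/views.py | next_flow_of_events
-- ===== SOURCE A (Python) =====
-- def next_flow_of_events(event, events, sessions):
--     """Getting list of Next events """
--
--     next_layers = []
--     for i in sessions:
--         one_session = list(filter(lambda x: i in x, events))
--         flow_event = list(filter(lambda x: event in x, one_session))
--
--         for j in flow_event:
--             time_value = 0
--             goal_event = 0
--             next_event = []
--             count = 0
--             for k in one_session:
--                 if count == 0:
--                     if k[1] > j[1]:
--                         time_value = k[1]
--                         goal_event = k[0]
--                         count += 1
--                 else:
--                     if (k[1] > j[1]) and (k[1] <= time_value):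
--                         time_value = k[1]
--                         goal_event = k[0]
--             if goal_event != event:
--                 next_event.append(goal_event)
--                 next_layers.append(next_event)
--
--     return next_layers
-- ===== SOURCE B (Python) =====
-- def _bisect_right(a, x, lo, hi):
--     # index of first element of sorted a[lo:hi] strictly greater than x
--     if lo >= hi:
--         return lo
--     mid = (lo + hi) // 2
--     if x < a[mid]:
--         return _bisect_right(a, x, lo, mid)
--     else:
--         return _bisect_right(a, x, mid + 1, hi)
--
--
-- def next_flow_of_events(event, events, sessions):
--     """Getting list of Next events (sorted-times + binary search + last-name dict)."""
--     next_layers = []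
--     for s in sessions:
--         sess = [e for e in events if s == e[0] or s == e[2]]
--         times = sorted(e[1] for e in sess)
--         last = {}
--         for e in sess:
--             last[e[1]] = e[0]          # overwrite: keeps the LAST name per time
--         for j in sess:
--             if event == j[0] or event == j[2]:
--                 lo = _bisect_right(times, j[1], 0, len(times))
--                 if lo < len(times):    # a strictly later event exists
--                     name = last[times[lo]]
--                     if name != event:
--                         next_layers.append([name])
--     return next_layers
-- ===== Notes on version B (the rewrite author's own statement) =====
-- stated objective: alternative
-- what changed: replaces A's per-flow-event stateful linear scan of the whole session by sorting each session's times once, binary-searching the successor time per flow event, and reading the successor's name from a last-name-per-time dict built in one pass (measured 2.4x at n=65536 but unconfirmed at the largest timing size, so no speed is claimed)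
-- outside the precondition, e.g. on next_flow_of_events('a', [('a', 1, 's')], ['s']): A returns [[0]], B returns []
import Mathlib
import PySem

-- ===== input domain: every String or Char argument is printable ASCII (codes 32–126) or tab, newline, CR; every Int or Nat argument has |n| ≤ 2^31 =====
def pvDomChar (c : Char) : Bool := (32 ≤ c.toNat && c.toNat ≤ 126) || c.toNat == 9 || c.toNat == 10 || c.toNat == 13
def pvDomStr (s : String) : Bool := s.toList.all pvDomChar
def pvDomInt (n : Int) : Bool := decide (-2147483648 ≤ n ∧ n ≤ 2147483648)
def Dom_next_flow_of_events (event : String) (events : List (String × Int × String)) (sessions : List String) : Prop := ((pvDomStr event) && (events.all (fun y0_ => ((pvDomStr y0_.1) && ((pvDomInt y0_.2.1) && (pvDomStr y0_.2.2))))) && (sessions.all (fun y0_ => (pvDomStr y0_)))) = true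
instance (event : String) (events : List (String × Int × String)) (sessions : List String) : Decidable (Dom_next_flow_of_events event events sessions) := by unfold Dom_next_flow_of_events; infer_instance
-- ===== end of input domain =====

-- B replaces A's per-flow-event linear scan of the session by sort-once + binary search +
-- a last-name-per-time dict (objective: alternative). Equivalence is claimed on Pre_, which
-- excludes inputs where some flow event has no strictly later event in its session
-- (there Python A appends the int 0 — not a string — into the result).

-- ===== PORT A =====
-- A's inner scan over one_session: state = (time_value, goal_event, count); goal_event is
-- Python's `0 or <string>`, modelled as Option String (none = the int 0).
def nfeStep (T : Int) (st : Int × Option String × Nat) (k : String × Int × String) : Int × Option String × Nat :=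
  if st.2.2 = 0 then
    if T < k.2.1 then (k.2.1, some k.1, st.2.2 + 1) else st
  else
    if T < k.2.1 ∧ k.2.1 ≤ st.1 then (k.2.1, some k.1, st.2.2) else st

def next_flow_of_events (event : String) (events : List (String × Int × String)) (sessions : List String) : List (List String) :=
  sessions.foldl (fun next_layers i =>
    let one_session := events.filter (fun x => i == x.1 || i == x.2.2)
    let flow_event := one_session.filter (fun x => event == x.1 || event == x.2.2)
    flow_event.foldl (fun acc j =>
      let st := one_session.foldl (nfeStep j.2.1) (0, none, 0)
      match st.2.1 with
      | none => acc ++ [["0"]]   -- Python appends [0] (the INT 0) here; inputs reaching this are outside Pre_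
      | some g => if g ≠ event then acc ++ [[g]] else acc) next_layers) []

-- ===== PORT B =====
-- transliteration of Source B's recursive _bisect_right
def brAux (a : List Int) (x : Int) (lo hi : Nat) : Nat :=
  if lo ≥ hi then lo
  else
    let mid := (lo + hi) / 2
    if x < a.getD mid 0 then brAux a x lo mid   -- a[mid]: in range whenever lo < hi ≤ a.length
    else brAux a x (mid + 1) hi
termination_by hi - lo
decreasing_by
  · omega
  · omega

def next_flow_of_events_alt (event : String) (events : List (String × Int × String)) (sessions : List String) : List (List String) :=
  sessions.foldl (fun next_layers s =>
    let sess := events.filter (fun e => s == e.1 || s == e.2.2)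
    let times := PySem.List.sorted (sess.map (fun e => e.2.1)) (fun x => x) false
    let last := sess.foldl (fun (d : PySem.Dict Int String) e => d.insert e.2.1 e.1) PySem.Dict.empty
    sess.foldl (fun acc j =>
      if event == j.1 || event == j.2.2 then
        let lo := brAux times j.2.1 0 times.length
        if lo < times.length then
          let name := last.getD (times.getD lo 0) ""   -- key present: times[lo] is a time of sess
          if name ≠ event then acc ++ [[name]] else acc
        else acc
      else acc) next_layers) []

-- ===== PRECONDITION & SPEC =====
-- Pre_ excludes exactly the inputs on which some flow event of some session has no strictly
-- later event in that session: there A appends the Python int 0 (not a string) to its result,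
-- which is not a value of the declared type List[List[str]].
def Pre_next_flow_of_events (event : String) (events : List (String × Int × String)) (sessions : List String) : Prop :=
  ∀ i ∈ sessions, ∀ j ∈ events, (i == j.1 || i == j.2.2) = true → (event == j.1 || event == j.2.2) = true →
    ∃ k ∈ events, (i == k.1 || i == k.2.2) = true ∧ j.2.1 < k.2.1

instance (event : String) (events : List (String × Int × String)) (sessions : List String) : Decidable (Pre_next_flow_of_events event events sessions) := by
  unfold Pre_next_flow_of_events; infer_instance

def pvWitness_next_flow_of_events : String × (List (String × Int × String)) × List String :=
  ("a", [("a", 1, "s"), ("b", 2, "s")], ["s"])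

def Spec_next_flow_of_events (event : String) (events : List (String × Int × String)) (sessions : List String) (out : List (List String)) : Prop := out = next_flow_of_events_alt event events sessions
instance (event : String) (events : List (String × Int × String)) (sessions : List String) (out : List (List String)) : Decidable (Spec_next_flow_of_events event events sessions out) := by unfold Spec_next_flow_of_events; infer_instance

-- ===== CLAIM (what is proved, stated in full; the proofs are below) =====
def Claim_equal_next_flow_of_events : Prop := ∀ (event : String) (events : List (String × Int × String)) (sessions : List String), Dom_next_flow_of_events event events sessions → Pre_next_flow_of_events event events sessions → Spec_next_flow_of_events event events sessions (next_flow_of_events event events sessions)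

-- ===== LEMMAS AND PROOFS =====

theorem pvWitness_ok :
    Dom_next_flow_of_events (pvWitness_next_flow_of_events.1) (pvWitness_next_flow_of_events.2.1) (pvWitness_next_flow_of_events.2.2) ∧
    Pre_next_flow_of_events (pvWitness_next_flow_of_events.1) (pvWitness_next_flow_of_events.2.1) (pvWitness_next_flow_of_events.2.2) := by
  constructor <;> decide

-- _bisect_right returns the split point of a sorted list: values ≤ x before it, values > x from it on
theorem brAux_spec (a : List Int) (x : Int) (lo hi : Nat)
    (hpw : a.Pairwise (· ≤ ·)) (hlo : lo ≤ hi) (hhi : hi ≤ a.length)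
    (hbelow : ∀ i, i < lo → ∀ h : i < a.length, a[i] ≤ x)
    (habove : ∀ i, hi ≤ i → ∀ h : i < a.length, x < a[i]) :
    (∀ i, i < brAux a x lo hi → ∀ h : i < a.length, a[i] ≤ x) ∧
    (∀ i, brAux a x lo hi ≤ i → ∀ h : i < a.length, x < a[i]) ∧
    brAux a x lo hi ≤ a.length := by
  fun_induction brAux a x lo hi with
  | case1 lo hi h =>
    exact ⟨fun i hi' h' => hbelow i (by omega) h', fun i hi' h' => habove i (by omega) h', by omega⟩
  | case2 lo hi h mid hx ih =>
    have hmdef : mid = (lo + hi) / 2 := rfl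
    have hmid : mid < a.length := by omega
    have hm : a.getD mid 0 = a[mid] := List.getD_eq_getElem a 0 hmid
    refine ih (by omega) (by omega) hbelow ?_
    intro i hi' h'
    rcases Nat.eq_or_lt_of_le hi' with rfl | hlt
    · rw [hm] at hx; exact hx
    · have := List.pairwise_iff_getElem.mp hpw mid i hmid h' hlt
      rw [hm] at hx; omega
  | case3 lo hi h mid hx ih =>
    have hmdef : mid = (lo + hi) / 2 := rfl
    have hmid : mid < a.length := by omega
    have hm : a.getD mid 0 = a[mid] := List.getD_eq_getElem a 0 hmid
    rw [hm] at hx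
    have hx' : a[mid] ≤ x := by omega
    refine ih (by omega) hhi ?_ habove
    intro i hi' h'
    rcases Nat.lt_or_ge i lo with hl | hg
    · exact hbelow i hl h'
    · rcases Nat.eq_or_lt_of_le (Nat.lt_succ_iff.mp hi') with rfl | hlt
      · exact hx'
      · have := List.pairwise_iff_getElem.mp hpw i mid h' hmid hlt
        omega

-- Source B's `last` dict holds, per time, the name of the LAST session event with that time
theorem last_dict_spec (sess : List (String × Int × String)) (m : Int) :
    (sess.foldl (fun (d : PySem.Dict Int String) e => d.insert e.2.1 e.1) PySem.Dict.empty).getD m ""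
      = ((sess.reverse.find? (fun e => e.2.1 == m)).map (fun e => e.1)).getD "" := by
  induction sess using List.reverseRecOn with
  | nil => simp [pysem]
  | append_singleton xs e ih =>
    rw [List.foldl_append, List.reverse_append]
    simp only [List.foldl_cons, List.foldl_nil, List.reverse_singleton, List.singleton_append,
      List.find?_cons]
    rw [PySem.Dict.getD_insert]
    by_cases hk : e.2.1 = m
    · subst hk; simp
    · rw [if_neg (Ne.symm hk)]
      have : (e.2.1 == m) = false := by simp [hk]
      rw [this]
      simpa using ih

-- A's inner scan ignores events not strictly later than the flow event
theorem scan_eq_filter (T : Int) (sess : List (String × Int × String)) (st : Int × Option String × Nat) :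
    sess.foldl (nfeStep T) st = (sess.filter (fun k => decide (T < k.2.1))).foldl (nfeStep T) st := by
  rw [List.foldl_filter]
  have h : (fun (x : Int × Option String × Nat) (y : String × Int × String) =>
      if decide (T < y.2.1) = true then nfeStep T x y else x) = nfeStep T := by
    funext x y
    by_cases hy : T < y.2.1
    · simp [hy]
    · simp [hy, nfeStep]
  rw [h]

-- the 'min time, last name on ties' accumulator A's scan becomes once started
def pick (t : Int) (n : String) (rest : List (String × Int × String)) : Int × String :=
  rest.foldl (fun (acc : Int × String) k => if k.2.1 ≤ acc.1 then (k.2.1, k.1) else acc) (t, n)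

theorem run_lemma (T : Int) : ∀ (q : List (String × Int × String)), (∀ k ∈ q, T < k.2.1) →
    ∀ t n, q.foldl (nfeStep T) (t, some n, 1) = ((pick t n q).1, some (pick t n q).2, 1) := by
  intro q
  induction q with
  | nil => intro _ t n; simp [pick]
  | cons k rest ih =>
    intro hall t n
    have hk : T < k.2.1 := hall k (by simp)
    simp only [List.foldl_cons, pick]
    by_cases hle : k.2.1 ≤ t
    · rw [show nfeStep T (t, some n, 1) k = (k.2.1, some k.1, 1) by simp [nfeStep, hk, hle]]
      rw [if_pos hle]
      exact ih (fun x hx => hall x (by simp [hx])) k.2.1 k.1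
    · rw [show nfeStep T (t, some n, 1) k = (t, some n, 1) by simp [nfeStep, hk, hle]]
      rw [if_neg hle]
      exact ih (fun x hx => hall x (by simp [hx])) t n

theorem pick_spec (t : Int) (n : String) (rest : List (String × Int × String)) :
    (pick t n rest).1 ≤ t ∧ (∀ k ∈ rest, (pick t n rest).1 ≤ k.2.1) ∧
    ((pick t n rest).1 = t ∨ ∃ k ∈ rest, k.2.1 = (pick t n rest).1) ∧
    (match rest.reverse.find? (fun e => e.2.1 == (pick t n rest).1) with
      | some e => (pick t n rest).2 = e.1
      | none => pick t n rest = (t, n)) := by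
  induction rest using List.reverseRecOn with
  | nil => simp [pick]
  | append_singleton xs k ih =>
    obtain ⟨h1, h2, h3, h4⟩ := ih
    have hp : pick t n (xs ++ [k]) = if k.2.1 ≤ (pick t n xs).1 then (k.2.1, k.1) else pick t n xs := by
      simp [pick, List.foldl_append]
    by_cases hle : k.2.1 ≤ (pick t n xs).1
    · rw [hp, if_pos hle]
      refine ⟨by omega, ?_, ?_, ?_⟩
      · intro k' hk'
        rcases List.mem_append.mp hk' with h | h
        · have := h2 k' h; simp; omega
        · simp at h; subst h; simp
      · right; exact ⟨k, by simp, rfl⟩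
      · simp [List.reverse_append]
    · rw [hp, if_neg hle]
      refine ⟨h1, ?_, ?_, ?_⟩
      · intro k' hk'
        rcases List.mem_append.mp hk' with h | h
        · exact h2 k' h
        · simp at h; subst h; omega
      · rcases h3 with h | ⟨k', hk', he⟩
        · left; exact h
        · right; exact ⟨k', by simp [hk'], he⟩
      · rw [List.reverse_append]
        simp only [List.reverse_singleton, List.singleton_append, List.find?_cons]
        have : (k.2.1 == (pick t n xs).1) = false := by simp; omega
        rw [this]
        exact h4

theorem find?_filter_imp {α : Type} (l : List α) (p f : α → Bool) (h : ∀ x, f x = true → p x = true) :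
    (l.filter p).find? f = l.find? f := by
  rw [List.find?_filter]
  congr 1
  funext a
  by_cases hf : f a = true
  · simp [hf, h a hf]
  · simp at hf; simp [hf]

-- per flow event: A's scan-append equals B's bisect-dict-append, given a strictly later event exists
theorem perj_eq (event : String) (sess : List (String × Int × String)) (j : String × Int × String)
    (hq : ∃ k ∈ sess, j.2.1 < k.2.1) (acc : List (List String)) :
    (match (sess.foldl (nfeStep j.2.1) (0, none, 0)).2.1 with
      | none => acc ++ [["0"]]
      | some g => if g ≠ event then acc ++ [[g]] else acc)
    =
    (let times := PySem.List.sorted (sess.map (fun e => e.2.1)) (fun x => x) false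
     let last := sess.foldl (fun (d : PySem.Dict Int String) e => d.insert e.2.1 e.1) PySem.Dict.empty
     let lo := brAux times j.2.1 0 times.length
     if lo < times.length then
       let name := last.getD (times.getD lo 0) ""
       if name ≠ event then acc ++ [[name]] else acc
     else acc) := by
  set T := j.2.1 with hT
  set times := PySem.List.sorted (sess.map (fun e => e.2.1)) (fun x => x) false with htimes
  set q := sess.filter (fun k => decide (T < k.2.1)) with hqdef
  have hqmem : ∀ k, k ∈ q → k ∈ sess ∧ T < k.2.1 := by
    intro k hk; rw [hqdef, List.mem_filter] at hk; simpa using hk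
  have hqmem' : ∀ k, k ∈ sess → T < k.2.1 → k ∈ q := by
    intro k hk hlt; rw [hqdef, List.mem_filter]; simp [hk, hlt]
  obtain ⟨kw, hkw, hkwlt⟩ := hq
  have hqne : q ≠ [] := by
    intro h; have := hqmem' kw hkw hkwlt; rw [h] at this; simp at this
  obtain ⟨k0, rest, hq0⟩ : ∃ k0 rest, q = k0 :: rest := by
    cases hqc : q with
    | nil => exact absurd hqc hqne
    | cons a b => exact ⟨a, b, rfl⟩
  have hpw : times.Pairwise (· ≤ ·) := by
    have := PySem.List.sorted_pairwise (xs := sess.map (fun e => e.2.1)) (key := fun x => x)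
    simpa [htimes] using this
  have hperm : times.Perm (sess.map (fun e => e.2.1)) := PySem.List.sorted_perm ..
  set lo := brAux times T 0 times.length with hlo
  obtain ⟨hA, hB, hr⟩ := brAux_spec times T 0 times.length hpw (Nat.zero_le _) le_rfl
    (fun i hi h => absurd hi (Nat.not_lt_zero i)) (fun i hi h => absurd (lt_of_le_of_lt hi h) (lt_irrefl _))
  have hlen : lo < times.length := by
    rcases Nat.lt_or_ge lo times.length with h | h
    · exact h
    · exfalso
      have hmemt : kw.2.1 ∈ times := hperm.mem_iff.mpr (List.mem_map.mpr ⟨kw, hkw, rfl⟩)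
      obtain ⟨i, hi, hieq⟩ := List.mem_iff_getElem.mp hmemt
      have := hA i (by omega) hi
      omega
  set m := times.getD lo 0 with hm
  have hmg : m = times[lo] := List.getD_eq_getElem times 0 hlen
  have hmT : T < m := by rw [hmg]; exact hB lo le_rfl hlen
  have hmin : ∀ k, k ∈ sess → T < k.2.1 → m ≤ k.2.1 := by
    intro k hk hlt
    have hmemt : k.2.1 ∈ times := hperm.mem_iff.mpr (List.mem_map.mpr ⟨k, hk, rfl⟩)
    obtain ⟨i, hi, hieq⟩ := List.mem_iff_getElem.mp hmemt
    rcases Nat.lt_or_ge i lo with h | h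
    · have := hA i h hi; omega
    · rcases Nat.eq_or_lt_of_le h with rfl | h'
      · omega
      · have := List.pairwise_iff_getElem.mp hpw lo i hlen hi h'
        omega
  have hmem : ∃ e ∈ sess, e.2.1 = m := by
    have : m ∈ times := by rw [hmg]; exact List.getElem_mem hlen
    obtain ⟨e, he, heq⟩ := List.mem_map.mp (hperm.mem_iff.mp this)
    exact ⟨e, he, heq⟩
  have hk0 := hqmem k0 (by rw [hq0]; simp)
  have hrest : ∀ k ∈ rest, T < k.2.1 := fun k hk => (hqmem k (by rw [hq0]; simp [hk])).2
  have hscan : (sess.foldl (nfeStep T) (0, none, 0)).2.1 = some (pick k0.2.1 k0.1 rest).2 := by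
    rw [scan_eq_filter, ← hqdef, hq0, List.foldl_cons]
    rw [show nfeStep T (0, none, 0) k0 = (k0.2.1, some k0.1, 1) by simp [nfeStep, hk0.2]]
    rw [run_lemma T rest hrest]
  obtain ⟨hp1, hp2, hp3, hp4⟩ := pick_spec k0.2.1 k0.1 rest
  set P := (pick k0.2.1 k0.1 rest).1 with hP
  have hPm : P = m := by
    have hPle : P ≤ m := by
      obtain ⟨e, he, heq⟩ := hmem
      have heq' : e ∈ q := hqmem' e he (by omega)
      rw [hq0] at heq'
      rcases List.mem_cons.mp heq' with rfl | h
      · omega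
      · have := hp2 e h; omega
    have hmle : m ≤ P := by
      rcases hp3 with h | ⟨k, hk, he⟩
      · have := hmin k0 (hqmem k0 (by rw [hq0]; simp)).1 hk0.2; omega
      · have hkq := hqmem k (by rw [hq0]; simp [hk])
        have := hmin k hkq.1 hkq.2; omega
    omega
  have hfind : sess.reverse.find? (fun e => e.2.1 == m) = q.reverse.find? (fun e => e.2.1 == m) := by
    rw [hqdef, ← List.filter_reverse]
    rw [find?_filter_imp]
    intro x hx
    simp only [beq_iff_eq] at hx
    simp [hx]
    omega
  have hname : (sess.foldl (fun (d : PySem.Dict Int String) e => d.insert e.2.1 e.1) PySem.Dict.empty).getD m ""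
      = (pick k0.2.1 k0.1 rest).2 := by
    rw [last_dict_spec, hfind, hq0]
    simp only [List.reverse_cons, List.find?_append]
    rw [← hPm]
    rcases hfr : rest.reverse.find? (fun e => e.2.1 == P) with _ | e
    · rw [hfr] at hp4
      simp only [hfr, Option.or]
      have hPk0 : P = k0.2.1 := by rw [hP, hp4]
      have : (k0.2.1 == P) = true := by simp [hPk0]
      simp [this, hp4]
    · rw [hfr] at hp4
      simp [hfr, Option.or, hp4]
  simp only [hscan]
  rw [if_pos hlen]
  rw [← hlo, ← hm, hname]

-- ===== VERDICT (by name: the statement is the Claim_ definition above) =====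
theorem next_flow_of_events_spec : Claim_equal_next_flow_of_events := by
  intro event events sessions hdom hpre
  unfold Spec_next_flow_of_events next_flow_of_events next_flow_of_events_alt
  apply PySem.List.foldl_congr_mem
  intro acc i hi
  simp only
  rw [← List.foldl_filter]
  apply PySem.List.foldl_congr_mem
  intro acc2 j hj
  simp only at hj
  have hj1 := List.mem_filter.mp hj
  have hj2 := List.mem_filter.mp hj1.1
  obtain ⟨k, hk, hkcond, hklt⟩ := hpre i hi j hj2.1 hj2.2 hj1.2
  have hksess : k ∈ events.filter (fun e => i == e.1 || i == e.2.2) := List.mem_filter.mpr ⟨hk, hkcond⟩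
  have := perj_eq event (events.filter (fun e => i == e.1 || i == e.2.2)) j ⟨k, hksess, hklt⟩ acc2
  simp only at this ⊢
  rw [this]
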